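-- pv_equiv track=rewrite | github.com/waynje/Yandex_Contest | Контест/Спринт 17/Сортировка по шаблону 2.py | logistics
-- ===== SOURCE A (Python) =====
-- def logistics(n, data, m, arr):
--     sorted_data = []
--     for i in arr:
--         if i in data:
--             sorted_data.extend([i] * data.count(i))
--             data = [x for x in data if x != i]
--     if n > m:
--         sorted_data.extend(sorted(data))
--     return sorted_data
-- ===== SOURCE B (Python) =====
-- def logistics(n, data, m, arr):
--     pos = {}
--     for i, v in enumerate(arr):
--         if v not in pos:
--             pos[v] = i
--     matched = sorted((x for x in data if x in pos), key=lambda x: pos[x])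
--     if n > m:
--         return matched + sorted(x for x in data if x not in pos)
--     return matched
-- ===== Notes on version B (the rewrite author's own statement) =====
-- stated objective: faster
-- what changed: B builds a first-occurrence position map over arr and then stably sorts the template-matched part of data by that position key (plus a plain sort of the leftover), instead of A's per-template-value scan of data, count, and list rebuild; correctness relies on elements sharing a position key being equal, so the key-sort reproduces A's group order exactly.
import Mathlib
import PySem

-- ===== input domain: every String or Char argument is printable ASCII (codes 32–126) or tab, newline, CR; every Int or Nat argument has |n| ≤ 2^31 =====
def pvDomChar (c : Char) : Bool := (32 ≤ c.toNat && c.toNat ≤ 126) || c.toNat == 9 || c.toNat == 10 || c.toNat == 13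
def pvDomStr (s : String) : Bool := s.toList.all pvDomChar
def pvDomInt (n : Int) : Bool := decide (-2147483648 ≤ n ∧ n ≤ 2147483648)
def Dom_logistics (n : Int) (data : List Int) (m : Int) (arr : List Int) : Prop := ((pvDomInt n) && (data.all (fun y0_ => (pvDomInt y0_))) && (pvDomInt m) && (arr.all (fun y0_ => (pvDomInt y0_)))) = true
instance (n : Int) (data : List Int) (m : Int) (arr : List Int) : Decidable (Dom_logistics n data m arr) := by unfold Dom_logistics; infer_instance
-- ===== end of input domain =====

-- B sorts the template-matched part of data by a first-occurrence position map over arr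
-- (and plain-sorts the leftover), replacing A's per-template-value scan-and-rebuild of data
-- (objective: faster). Equivalence of return values is proved on the whole domain.


-- ===== PORT A =====
def logistics (n : Int) (data : List Int) (m : Int) (arr : List Int) : List Int :=
  let st : List Int × List Int :=
    arr.foldl (fun st i =>
      if st.2.contains i then
        (st.1 ++ PySem.List.pyRepeat [i] (st.2.count i), st.2.filter (fun x => x != i))
      else st) ([], data)
  if n > m then st.1 ++ PySem.List.sorted st.2 (fun x => x) false else st.1

-- ===== PORT B =====
def logistics_alt (n : Int) (data : List Int) (m : Int) (arr : List Int) : List Int :=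
  let pos : PySem.Dict Int Int :=
    (PySem.List.enumerate arr 0).foldl
      (fun d p => if d.contains p.2 then d else d.insert p.2 p.1) PySem.Dict.empty
  let matched : List Int :=
    PySem.List.sorted (data.filter (fun x => pos.contains x)) (fun x => pos.getD x 0) false
  if n > m then
    matched ++ PySem.List.sorted (data.filter (fun x => !(pos.contains x))) (fun x => x) false
  else matched

-- ===== PRECONDITION & SPEC =====
def Spec_logistics (n : Int) (data : List Int) (m : Int) (arr : List Int) (out : List Int) : Prop := out = logistics_alt n data m arr
instance (n : Int) (data : List Int) (m : Int) (arr : List Int) (out : List Int) : Decidable (Spec_logistics n data m arr out) := by unfold Spec_logistics; infer_instance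

-- ===== CLAIM (what is proved, stated in full; the proofs are below) =====
def Claim_equal_logistics : Prop := ∀ (n : Int) (data : List Int) (m : Int) (arr : List Int), Dom_logistics n data m arr → Spec_logistics n data m arr (logistics n data m arr)

-- ===== LEMMAS AND PROOFS =====

-- the common "matched" part: template values (first occurrences, in order), each repeated its count in data
def pvCore (data l : List Int) : List Int :=
  (PySem.List.dedup l).flatMap (fun i => List.replicate (data.count i) i)

-- the common "leftover": elements of data not mentioned in the template prefix l
def pvRest (data l : List Int) : List Int :=
  data.filter (fun x => !(l.contains x))

theorem pvCore_append_singleton (data l : List Int) (i : Int) :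
    pvCore data (l ++ [i]) =
      if i ∈ l then pvCore data l else pvCore data l ++ List.replicate (data.count i) i := by
  unfold pvCore
  simp only [PySem.List.dedup_eq_ofList, PySem.Set.ofList_append_singleton, PySem.Set.add_eq_ite,
    PySem.Set.mem_ofList]
  split_ifs with h <;> simp [List.flatMap_append]

theorem pvRest_append_singleton_of_mem (data l : List Int) (i : Int) (h : i ∈ l ∨ i ∉ data) :
    pvRest data (l ++ [i]) = pvRest data l := by
  unfold pvRest
  apply List.filter_congr
  intro x hx
  rcases h with h | h
  · by_cases hxi : x = i
    · subst hxi; simp [List.contains_eq_mem, h]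
    · simp [List.contains_eq_mem, hxi]
  · by_cases hxi : x = i
    · exact absurd (hxi ▸ hx) h
    · simp [List.contains_eq_mem, hxi]

theorem pvRest_append_singleton (data l : List Int) (i : Int) :
    pvRest data (l ++ [i]) = (pvRest data l).filter (fun x => x != i) := by
  unfold pvRest
  rw [List.filter_filter]
  apply List.filter_congr
  intro x _
  by_cases hxi : x = i <;> simp [List.contains_eq_mem, hxi]

theorem pvRest_mem_iff (data l : List Int) (i : Int) :
    i ∈ pvRest data l ↔ i ∈ data ∧ i ∉ l := by
  simp [pvRest]

theorem pvRest_count_of_not_mem (data l : List Int) (i : Int) (h : i ∉ l) :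
    (pvRest data l).count i = data.count i := by
  unfold pvRest
  rw [List.count_filter]
  simp [h]

-- A's loop invariant
theorem logistics_foldA (data : List Int) :
    ∀ (arr pre : List Int),
      arr.foldl (fun (st : List Int × List Int) i =>
        if st.2.contains i then
          (st.1 ++ PySem.List.pyRepeat [i] (st.2.count i), st.2.filter (fun x => x != i))
        else st) (pvCore data pre, pvRest data pre)
      = (pvCore data (pre ++ arr), pvRest data (pre ++ arr)) := by
  intro arr
  induction arr with
  | nil => intro pre; simp
  | cons i t ih =>
    intro pre
    have hstep :
        (if (pvRest data pre).contains i then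
          (pvCore data pre ++ PySem.List.pyRepeat [i] ((pvRest data pre).count i),
            (pvRest data pre).filter (fun x => x != i))
        else (pvCore data pre, pvRest data pre))
        = (pvCore data (pre ++ [i]), pvRest data (pre ++ [i])) := by
      by_cases hm : i ∈ pvRest data pre
      · have hd : i ∈ data ∧ i ∉ pre := (pvRest_mem_iff data pre i).1 hm
        rw [if_pos (by simpa using hm), pvCore_append_singleton, if_neg hd.2,
          pvRest_append_singleton, pvRest_count_of_not_mem data pre i hd.2,
          PySem.List.pyRepeat_singleton]
        simp
      · have hd : i ∈ pre ∨ i ∉ data := by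
          by_cases hp : i ∈ pre
          · exact Or.inl hp
          · exact Or.inr (fun hdd => hm ((pvRest_mem_iff data pre i).2 ⟨hdd, hp⟩))
        rw [if_neg (by simpa using hm), pvRest_append_singleton_of_mem data pre i hd,
          pvCore_append_singleton]
        rcases hd with hd | hd
        · rw [if_pos hd]
        · rw [List.count_eq_zero_of_not_mem hd]
          split_ifs <;> simp
    rw [List.foldl_cons, hstep, ih (pre ++ [i])]
    simp


theorem pv_pos_get? (arr : List Int) :
    ∀ (s : Int) (d : PySem.Dict Int Int) (v : Int),
      ((PySem.List.enumerate arr s).foldl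
        (fun d p => if d.contains p.2 then d else d.insert p.2 p.1) d).get? v
      = if d.contains v then d.get? v
        else (PySem.List.index? arr v).map (fun (k : Nat) => s + (k : Int)) := by
  induction arr with
  | nil =>
    intro s d v
    simp only [PySem.List.enumerate_nil, List.foldl_nil, PySem.List.index?_eq_idxOf?,
      List.idxOf?_nil, Option.map_none]
    split_ifs with h
    · rfl
    · exact (PySem.Dict.get?_eq_none_iff_contains d v).2 (by simpa using h)
  | cons x t ih =>
    intro s d v
    rw [PySem.List.enumerate_cons, List.foldl_cons]
    by_cases hx : d.contains x = true
    · rw [if_pos hx]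
      rw [ih]
      by_cases hv : d.contains v = true
      · simp [hv]
      · have hne : x ≠ v := by rintro rfl; exact absurd hx (by simp [hv])
        rw [PySem.List.index?_cons_of_ne t hne, if_neg hv, if_neg hv]
        cases PySem.List.index? t v with
        | none => simp
        | some k => simp; ring
    · rw [if_neg hx]
      rw [ih]
      by_cases hvx : v = x
      · subst hvx
        have hc : (d.insert v s).contains v = true := PySem.Dict.contains_insert_self d v s
        rw [if_pos hc, if_neg hx]
        rw [PySem.Dict.get?_insert_self, PySem.List.index?_cons_self]
        simp
      · have hc : (d.insert x s).contains v = d.contains v := by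
          rw [PySem.Dict.contains_insert d x v s]
          simp [show (v == x) = false by simp [hvx]]
        rw [hc]
        by_cases hv : d.contains v = true
        · rw [if_pos hv, if_pos hv]
          exact PySem.Dict.get?_insert_of_ne d s hvx
        · rw [if_neg hv, if_neg hv]
          rw [PySem.List.index?_cons_of_ne t (Ne.symm hvx)]
          cases PySem.List.index? t v with
          | none => simp
          | some k => simp; ring

theorem pv_uniq_sorted (key : Int → Int) :
    ∀ (ys zs : List Int), ys.Perm zs →
      ys.Pairwise (fun a b => key a ≤ key b) → zs.Pairwise (fun a b => key a ≤ key b) →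
      (∀ a ∈ ys, ∀ b ∈ ys, key a = key b → a = b) → ys = zs := by
  intro ys
  induction ys with
  | nil => intro zs hp _ _ _; simpa using hp.symm.eq_nil
  | cons y t ih =>
    intro zs hp hys hzs hfib
    cases zs with
    | nil => exact absurd hp.symm (by simp)
    | cons z u =>
      have hzmem : z ∈ y :: t := hp.symm.subset (by simp)
      have hymem : y ∈ z :: u := hp.subset (by simp)
      have hkyz : key y ≤ key z := by
        rcases List.mem_cons.1 hzmem with h | h
        · rw [h]
        · exact (List.pairwise_cons.1 hys).1 z h
      have hkzy : key z ≤ key y := by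
        rcases List.mem_cons.1 hymem with h | h
        · rw [h]
        · exact (List.pairwise_cons.1 hzs).1 y h
      have hzy : z = y := hfib z hzmem y (by simp) (le_antisymm hkzy hkyz)
      subst hzy
      have ht : t.Perm u := hp.cons_inv
      have := ih u ht (List.pairwise_cons.1 hys).2 (List.pairwise_cons.1 hzs).2
        (fun a ha b hb h => hfib a (by simp [ha]) b (by simp [hb]) h)
      rw [this]

def pvKey (arr : List Int) (v : Int) : Int := (((PySem.List.index? arr v).getD 0 : Nat) : Int)

theorem pvKey_cons_self (x : Int) (t : List Int) : pvKey (x :: t) x = 0 := by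
  unfold pvKey
  rw [PySem.List.index?_cons_self]
  simp

theorem pvKey_cons_of_ne (x : Int) (t : List Int) (v : Int) (hne : x ≠ v) (hv : v ∈ t) :
    pvKey (x :: t) v = pvKey t v + 1 := by
  unfold pvKey
  rw [PySem.List.index?_cons_of_ne t hne]
  obtain ⟨k, hk⟩ := Option.isSome_iff_exists.1 ((PySem.List.index?_isSome_iff t v).2 hv)
  rw [hk]
  simp

theorem pvKey_pos_of_mem_of_ne (x : Int) (t : List Int) (v : Int) (hne : x ≠ v) (hv : v ∈ t) :
    0 < pvKey (x :: t) v := by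
  rw [pvKey_cons_of_ne x t v hne hv]
  have : 0 ≤ pvKey t v := by unfold pvKey; positivity
  omega

theorem pv_dedup_pairwise (arr : List Int) :
    (PySem.List.dedup arr).Pairwise (fun a b => pvKey arr a < pvKey arr b) := by
  induction arr with
  | nil => simp [PySem.List.dedup]
  | cons x t ih =>
    rw [PySem.List.dedup_eq_ofList, PySem.Set.ofList_cons]
    rw [List.pairwise_cons]
    constructor
    · intro b hb
      have hbmem : b ∈ PySem.Set.ofList t ∧ b ≠ x := by
        simpa using (PySem.Set.mem_discard (PySem.Set.ofList t) x b).1 hb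
      have hbt : b ∈ t := (PySem.Set.mem_ofList t b).1 hbmem.1
      rw [pvKey_cons_self]
      exact pvKey_pos_of_mem_of_ne x t b (Ne.symm hbmem.2) hbt
    · have hsub : ((PySem.Set.ofList t).discard x).Sublist (PySem.Set.ofList t) := by
        simpa [PySem.Set.discard] using List.filter_sublist (l := PySem.Set.ofList t)
      have hpw := (ih.sublist (by simpa [PySem.List.dedup_eq_ofList] using hsub) :
        ((PySem.Set.ofList t).discard x).Pairwise (fun a b => pvKey t a < pvKey t b))
      refine List.Pairwise.imp_of_mem ?_ hpw
      intro a b ha hb hab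
      have ha' := (PySem.Set.mem_discard (PySem.Set.ofList t) x a).1 ha
      have hb' := (PySem.Set.mem_discard (PySem.Set.ofList t) x b).1 hb
      rw [pvKey_cons_of_ne x t a (Ne.symm ha'.2) ((PySem.Set.mem_ofList t a).1 ha'.1),
        pvKey_cons_of_ne x t b (Ne.symm hb'.2) ((PySem.Set.mem_ofList t b).1 hb'.1)]
      omega

theorem pv_flatMap_pairwise (key : Int → Int) (c : Int → Nat) (l : List Int)
    (h : l.Pairwise (fun a b => key a < key b)) :
    (l.flatMap (fun i => List.replicate (c i) i)).Pairwise (fun a b => key a ≤ key b) := by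
  induction l with
  | nil => simp
  | cons x t ih =>
    rw [List.flatMap_cons]
    obtain ⟨hhead, htail⟩ := List.pairwise_cons.1 h
    apply List.pairwise_append.2
    refine ⟨?_, ih htail, ?_⟩
    · refine List.pairwise_iff_forall_sublist.2 ?_
      intro a b hs
      have hmem := hs.subset
      have ha : a = x := List.eq_of_mem_replicate (hmem (by simp))
      have hb : b = x := List.eq_of_mem_replicate (hmem (by simp))
      subst ha; subst hb; exact le_refl _
    · intro a ha b hb
      have ha' : a = x := List.eq_of_mem_replicate ha
      obtain ⟨i, hi, hbi⟩ := List.mem_flatMap.1 hb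
      have hb' : b = i := List.eq_of_mem_replicate hbi
      rw [ha', hb']
      exact le_of_lt (hhead i hi)

theorem pv_flatMap_count (data : List Int) (v : Int) :
    ∀ (l : List Int), l.Nodup →
      (l.flatMap (fun i => List.replicate (data.count i) i)).count v
        = if v ∈ l then data.count v else 0 := by
  intro l
  induction l with
  | nil => simp
  | cons x t ih =>
    intro hnd
    rw [List.flatMap_cons, List.count_append, List.count_replicate,
      ih (List.nodup_cons.1 hnd).2]
    by_cases hvx : v = x
    · subst hvx
      simp [(List.nodup_cons.1 hnd).1]
    · simp [hvx, Ne.symm hvx]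

def pvPos (arr : List Int) : PySem.Dict Int Int :=
  (PySem.List.enumerate arr 0).foldl
    (fun d p => if d.contains p.2 then d else d.insert p.2 p.1) PySem.Dict.empty


theorem pv_pos_get?_eq (arr : List Int) (v : Int) :
    (pvPos arr).get? v = (PySem.List.index? arr v).map (fun (k : Nat) => ((k : Int))) := by
  unfold pvPos
  rw [pv_pos_get? arr 0 PySem.Dict.empty v]
  simp [PySem.Dict.contains_empty]

theorem pv_pos_contains (arr : List Int) (v : Int) :
    (pvPos arr).contains v = decide (v ∈ arr) := by
  rw [PySem.Dict.contains_eq_isSome_get?, pv_pos_get?_eq]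
  by_cases hv : v ∈ arr
  · simp [hv, Option.isSome_map]
  · rw [(PySem.List.index?_eq_none_iff arr v).2 hv]
    simp [hv]

theorem pv_pos_getD_of_mem (arr : List Int) (v : Int) (hv : v ∈ arr) :
    (pvPos arr).getD v 0 = pvKey arr v := by
  unfold pvKey
  rw [PySem.Dict.getD_eq_get?_getD, pv_pos_get?_eq]
  obtain ⟨k, hk⟩ := Option.isSome_iff_exists.1 ((PySem.List.index?_isSome_iff arr v).2 hv)
  rw [hk]
  simp

theorem pv_fiber (arr : List Int) (v w : Int) (hv : v ∈ arr) (hw : w ∈ arr)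
    (h : pvKey arr v = pvKey arr w) : v = w := by
  obtain ⟨k, hk⟩ := Option.isSome_iff_exists.1 ((PySem.List.index?_isSome_iff arr v).2 hv)
  obtain ⟨j, hj⟩ := Option.isSome_iff_exists.1 ((PySem.List.index?_isSome_iff arr w).2 hw)
  have hkj : k = j := by
    unfold pvKey at h
    rw [hk, hj] at h
    simpa using h
  obtain ⟨hlt, hv', _⟩ := PySem.List.getElem_of_index?_eq_some hk
  obtain ⟨hlt', hw', _⟩ := PySem.List.getElem_of_index?_eq_some hj
  subst hkj
  rw [← hv', ← hw']

theorem pv_mem_pvCore (data arr : List Int) (a : Int) (h : a ∈ pvCore data arr) : a ∈ arr := by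
  obtain ⟨i, hi, hai⟩ := List.mem_flatMap.1 h
  have := List.eq_of_mem_replicate hai
  subst this
  exact (PySem.List.mem_dedup arr a).1 hi

theorem pv_core_perm (data arr : List Int) :
    (pvCore data arr).Perm (data.filter (fun x => decide (x ∈ arr))) := by
  rw [List.perm_iff_count]
  intro v
  unfold pvCore
  rw [pv_flatMap_count data v (PySem.List.dedup arr)
    (by rw [PySem.List.dedup_eq_ofList]; exact PySem.Set.nodup_ofList arr)]
  by_cases hv : v ∈ arr
  · rw [if_pos ((PySem.List.mem_dedup arr v).2 hv), List.count_filter (by simp [hv])]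
  · have hnd : v ∉ PySem.List.dedup arr := fun h => hv ((PySem.List.mem_dedup arr v).1 h)
    rw [if_neg hnd]
    symm
    rw [List.count_eq_zero]
    simp [hv]

theorem pv_core_pairwise (data arr : List Int) :
    (pvCore data arr).Pairwise (fun a b => (pvPos arr).getD a 0 ≤ (pvPos arr).getD b 0) := by
  have h1 := pv_flatMap_pairwise (pvKey arr) (fun i => data.count i) (PySem.List.dedup arr)
    (pv_dedup_pairwise arr)
  refine List.Pairwise.imp_of_mem ?_ h1
  intro a b ha hb hab
  rw [pv_pos_getD_of_mem arr a (pv_mem_pvCore data arr a ha),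
    pv_pos_getD_of_mem arr b (pv_mem_pvCore data arr b hb)]
  exact hab

theorem pv_sorted_matched (data arr : List Int) :
    PySem.List.sorted (data.filter (fun x => (pvPos arr).contains x))
      (fun x => (pvPos arr).getD x 0) false = pvCore data arr := by
  have hfil : data.filter (fun x => (pvPos arr).contains x)
      = data.filter (fun x => decide (x ∈ arr)) := by
    apply List.filter_congr
    intro x _
    rw [pv_pos_contains]
  rw [hfil]
  refine (pv_uniq_sorted (fun x => (pvPos arr).getD x 0) (pvCore data arr) _ ?_ ?_ ?_ ?_).symm
  · exact (pv_core_perm data arr).trans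
      (PySem.List.sorted_perm (data.filter (fun x => decide (x ∈ arr)))
        (fun x => (pvPos arr).getD x 0) false).symm
  · exact pv_core_pairwise data arr
  · exact PySem.List.sorted_pairwise _ _
  · intro a ha b hb h
    have ha' := pv_mem_pvCore data arr a ha
    have hb' := pv_mem_pvCore data arr b hb
    apply pv_fiber arr a b ha' hb'
    rw [← pv_pos_getD_of_mem arr a ha', ← pv_pos_getD_of_mem arr b hb']
    exact h

theorem pv_leftover (data arr : List Int) :
    data.filter (fun x => !(pvPos arr).contains x)
      = data.filter (fun x => !(arr.contains x)) := by
  apply List.filter_congr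
  intro x _
  rw [pv_pos_contains]
  by_cases hx : x ∈ arr <;> simp [hx, List.contains_eq_mem]

-- ===== VERDICT (by name: the statement is the Claim_ definition above) =====
theorem logistics_spec : Claim_equal_logistics := by
  intro n data m arr _
  unfold Spec_logistics logistics logistics_alt
  have hA := logistics_foldA data arr []
  have h0 : pvCore data ([] : List Int) = [] := by simp [pvCore, PySem.List.dedup]
  have hr0 : pvRest data ([] : List Int) = data := by simp [pvRest]
  rw [h0, hr0] at hA
  simp only [List.nil_append] at hA
  have hM := pv_sorted_matched data arr
  have hL : data.filter (fun x => !(pvPos arr).contains x) = pvRest data arr := by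
    rw [pv_leftover]
    unfold pvRest
    rfl
  simp only [pvPos] at hM hL
  simp only [hA, hM, hL]
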